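-- pv_equiv track=rewrite | github.com/distantsoil/Confluence-Import-Export-Tool | confluence_tool/import_/importer.py | _sort_pages_by_hierarchy
-- ===== SOURCE A (Python) =====
-- from typing import Dict, List, Any, Optional, Tuple
--
-- def _sort_pages_by_hierarchy(pages_metadata: List[Dict[str, Any]]) -> List[Dict[str, Any]]:
--     """Sort pages by hierarchy (parents before children).
--
--     Args:
--         pages_metadata: List of page metadata dictionaries
--
--     Returns:
--         Sorted list of page metadata dictionaries
--     """
--     # Create a simple sort: pages without ancestors first, then others
--     root_pages = []
--     child_pages = []
--
--     for page_info in pages_metadata: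
--         ancestors = page_info.get('metadata', {}).get('ancestors', [])
--         if not ancestors:
--             root_pages.append(page_info)
--         else:
--             child_pages.append(page_info)
--
--     # Sort child pages by ancestor count (closer to root first)
--     child_pages.sort(key=lambda x: len(x.get('metadata', {}).get('ancestors', [])))
--
--     return root_pages + child_pages
-- ===== SOURCE B (Python) =====
-- from typing import Dict, List, Any
--
--
-- def _sort_pages_by_hierarchy(pages_metadata: List[Dict[str, Any]]) -> List[Dict[str, Any]]:
--     """Sort pages by hierarchy (parents before children).
--
--     One stable sort over all pages keyed on ancestor count: roots have key 0,
--     so they come first in original order; ties keep original order.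
--     """
--     return sorted(
--         pages_metadata,
--         key=lambda p: len(p.get('metadata', {}).get('ancestors', [])),
--     )
-- ===== Notes on version B (the rewrite author's own statement) =====
-- stated objective: simpler
-- what changed: Replaces the partition-into-roots-and-children-then-sort-children structure with a single stable sort of the whole list keyed on ancestor count; stability and the fact that roots have the minimal key 0 make the results identical.
import Mathlib
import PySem

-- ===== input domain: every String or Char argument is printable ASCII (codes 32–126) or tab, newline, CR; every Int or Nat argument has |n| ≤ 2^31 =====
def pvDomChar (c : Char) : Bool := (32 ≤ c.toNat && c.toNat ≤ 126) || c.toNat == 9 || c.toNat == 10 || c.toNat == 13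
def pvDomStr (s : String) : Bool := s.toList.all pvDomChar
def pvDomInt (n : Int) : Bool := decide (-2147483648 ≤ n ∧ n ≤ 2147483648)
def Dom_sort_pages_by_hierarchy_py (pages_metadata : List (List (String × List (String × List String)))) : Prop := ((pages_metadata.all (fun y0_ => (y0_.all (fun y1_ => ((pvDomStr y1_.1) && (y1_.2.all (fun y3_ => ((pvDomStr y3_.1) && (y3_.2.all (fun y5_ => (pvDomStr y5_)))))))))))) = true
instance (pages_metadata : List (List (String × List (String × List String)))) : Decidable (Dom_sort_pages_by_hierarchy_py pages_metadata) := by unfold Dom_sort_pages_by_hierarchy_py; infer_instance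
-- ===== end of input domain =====

-- B replaces A's partition-into-roots-and-children-then-sort-children with one stable
-- sort of the whole list keyed on ancestor count (simpler; same result by stability).


-- ===== PORT A =====
-- page_info.get('metadata', {}).get('ancestors', [])
def pvAncestors (page_info : List (String × List (String × List String))) : List String :=
  PySem.Dict.getD (PySem.Dict.mk (PySem.Dict.getD (PySem.Dict.mk page_info) "metadata" [])) "ancestors" []

def sort_pages_by_hierarchy_py (pages_metadata : List (List (String × List (String × List String)))) : List (List (String × List (String × List String))) :=
  -- the partition loop: root_pages / child_pages accumulated by appends
  let part := pages_metadata.foldl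
    (fun (acc : List (List (String × List (String × List String))) × List (List (String × List (String × List String)))) page_info =>
      let ancestors := pvAncestors page_info
      if ancestors = [] then (acc.1 ++ [page_info], acc.2) else (acc.1, acc.2 ++ [page_info]))
    ([], [])
  -- child_pages.sort(key=lambda x: len(...)) is a stable sort
  part.1 ++ PySem.List.sorted part.2 (fun x => (pvAncestors x).length) false

-- ===== PORT B =====
def sort_pages_by_hierarchy_py_alt (pages_metadata : List (List (String × List (String × List String)))) : List (List (String × List (String × List String))) :=
  PySem.List.sorted pages_metadata (fun p => (pvAncestors p).length) false

-- ===== PRECONDITION & SPEC =====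
def Spec_sort_pages_by_hierarchy_py (pages_metadata : List (List (String × List (String × List String)))) (out : List (List (String × List (String × List String)))) : Prop := out = sort_pages_by_hierarchy_py_alt pages_metadata
instance (pages_metadata : List (List (String × List (String × List String)))) (out : List (List (String × List (String × List String)))) : Decidable (Spec_sort_pages_by_hierarchy_py pages_metadata out) := by unfold Spec_sort_pages_by_hierarchy_py; infer_instance

-- ===== CLAIM (what is proved, stated in full; the proofs are below) =====
def Claim_equal_sort_pages_by_hierarchy_py : Prop := ∀ (pages_metadata : List (List (String × List (String × List String)))), Dom_sort_pages_by_hierarchy_py pages_metadata → Spec_sort_pages_by_hierarchy_py pages_metadata (sort_pages_by_hierarchy_py pages_metadata)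

-- ===== LEMMAS AND PROOFS =====

-- inserting past a prefix R that x never goes before
theorem pv_insertBy_append_left {α : Type} (before : α → α → Bool) (x : α) (R C : List α)
    (h : ∀ r ∈ R, before x r = false) :
    PySem.List.insertBy before x (R ++ C) = R ++ PySem.List.insertBy before x C := by
  induction R with
  | nil => simp
  | cons r R ih =>
      have hr : before x r = false := h r (by simp)
      simp only [List.cons_append, PySem.List.insertBy, hr]
      simp only [Bool.false_eq_true, if_false]
      exact congrArg (r :: ·) (ih fun y hy => h y (by simp [hy]))

-- x goes before everything in C, so it lands at the head
theorem pv_insertBy_cons_of_before {α : Type} (before : α → α → Bool) (x : α) (C : List α)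
    (h : ∀ c ∈ C, before x c = true) :
    PySem.List.insertBy before x C = x :: C := by
  cases C with
  | nil => rfl
  | cons c C => simp [PySem.List.insertBy, h c (by simp)]

-- invariant of insertion sort with a Nat key: key-0 elements collect in front, in order
theorem pv_foldl_ins_split {α : Type} (key : α → Nat) :
    ∀ (xs R C : List α), (∀ r ∈ R, key r = 0) → (∀ c ∈ C, key c ≠ 0) →
      xs.foldl (fun acc x => PySem.List.insertBy (fun a b => decide (key a < key b)) x acc) (R ++ C)
        = (R ++ xs.filter (fun x => key x == 0)) ++
          (xs.filter (fun x => key x != 0)).foldl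
            (fun acc x => PySem.List.insertBy (fun a b => decide (key a < key b)) x acc) C := by
  intro xs
  induction xs with
  | nil => intro R C _ _; simp
  | cons x xs ih =>
      intro R C hR hC
      have hpast : ∀ r ∈ R, (decide (key x < key r)) = false := by
        intro r hr; simp [hR r hr]
      by_cases hx : key x = 0
      · have h1 : PySem.List.insertBy (fun a b => decide (key a < key b)) x (R ++ C)
            = (R ++ [x]) ++ C := by
          rw [pv_insertBy_append_left _ _ _ _ hpast,
              pv_insertBy_cons_of_before _ _ _ (by
                intro c hc; have := hC c hc; simp [hx]; omega)]
          simp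
        simp only [List.foldl_cons, h1]
        rw [ih (R ++ [x]) C (by intro r hr; rcases List.mem_append.mp hr with h | h
                                · exact hR r h
                                · simp at h; simpa [h] using hx) hC]
        simp [hx]
      · have h1 : PySem.List.insertBy (fun a b => decide (key a < key b)) x (R ++ C)
            = R ++ PySem.List.insertBy (fun a b => decide (key a < key b)) x C := by
          rw [pv_insertBy_append_left _ _ _ _ hpast]
        simp only [List.foldl_cons, h1]
        rw [ih R _ hR (by
              intro c hc
              rcases (PySem.List.mem_insertBy _ _ _ _).mp hc with h | h
              · simpa [h] using hx
              · exact hC c h)]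
        simp [hx]

-- stable sort by a Nat key = (key-0 elements in order) ++ sorted rest
theorem pv_sorted_split {α : Type} (key : α → Nat) (xs : List α) :
    PySem.List.sorted xs key false
      = xs.filter (fun x => key x == 0)
        ++ PySem.List.sorted (xs.filter (fun x => key x != 0)) key false := by
  rw [PySem.List.sorted_eq_foldl_insertBy, PySem.List.sorted_eq_foldl_insertBy]
  simpa using pv_foldl_ins_split key xs [] [] (by simp) (by simp)

-- A's partition loop computes the two filters
theorem pv_partition (xs : List (List (String × List (String × List String))))
    (R C : List (List (String × List (String × List String)))) :
    xs.foldl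
      (fun acc page_info =>
        let ancestors := pvAncestors page_info
        if ancestors = [] then (acc.1 ++ [page_info], acc.2) else (acc.1, acc.2 ++ [page_info]))
      (R, C)
      = (R ++ xs.filter (fun x => (pvAncestors x).length == 0),
         C ++ xs.filter (fun x => (pvAncestors x).length != 0)) := by
  induction xs generalizing R C with
  | nil => simp
  | cons x xs ih =>
      by_cases hx : pvAncestors x = []
      · simp [List.foldl_cons, hx, ih]
      · simp [List.foldl_cons, hx, ih, List.length_eq_zero_iff]

-- ===== VERDICT (by name: the statement is the Claim_ definition above) =====
theorem sort_pages_by_hierarchy_py_spec : Claim_equal_sort_pages_by_hierarchy_py := by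
  intro pm _
  show sort_pages_by_hierarchy_py pm = sort_pages_by_hierarchy_py_alt pm
  unfold sort_pages_by_hierarchy_py sort_pages_by_hierarchy_py_alt
  rw [pv_partition pm [] []]
  simp only [List.nil_append]
  rw [pv_sorted_split (fun p => (pvAncestors p).length) pm]
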